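-- pv_equiv track=rewrite | github.com/GeonHyeongKim/2022-2-Algorithm-Study | src/chanhyun/week6/n진수 게임.py | solution
-- ===== SOURCE A (Python) =====
-- def change(n, k):
--     result = ''
--     while k >= 1:
--         remainder = k%n
--         if remainder >= 10:
--             remainder = chr(ord('A')+(remainder-10))
--             result = remainder + result
--         else:
--             result = str(remainder) + result
--         k = k // n
--     return result
--
-- def solution(n, t, m, p):
--     answer = ''
--     sequence = '0'
--     k = 1
--     while len(answer) < t:
--         sequence += change(n, k)
--         if len(sequence) >= p:
--             answer += sequence[p-1]
--             p += m
--         k += 1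
--     return answer
-- ===== SOURCE B (Python) =====
-- def change(n, k):
--     result = ''
--     while k >= 1:
--         remainder = k%n
--         if remainder >= 10:
--             remainder = chr(ord('A')+(remainder-10))
--             result = remainder + result
--         else:
--             result = str(remainder) + result
--         k = k // n
--     return result
--
-- def solution(n, t, m, p):
--     if t <= 0:
--         return ''
--     need = p + m * (t - 1)
--     parts = ['0']
--     total = 1
--     k = 1
--     while total < need:
--         c = change(n, k)
--         parts.append(c)
--         total += len(c)
--         k += 1
--     s = ''.join(parts)
--     return ''.join(s[p - 1 + m * i] for i in range(t))
-- ===== Notes on version B (the rewrite author's own statement) =====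
-- stated objective: simpler
-- what changed: A interleaves digit generation with sampling in one while loop that advances a moving cursor p and appends one answer character per iteration; B first generates the digit string up to the last needed position p+m*(t-1) and then reads the t sampled characters directly at the closed-form indices p-1+m*i.
-- outside the precondition, e.g. on solution(2, 1, 1, 0): A returns '1', B returns '0'; on solution(2, 2, -1, 2): A returns '10', B raises IndexError
import Mathlib
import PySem

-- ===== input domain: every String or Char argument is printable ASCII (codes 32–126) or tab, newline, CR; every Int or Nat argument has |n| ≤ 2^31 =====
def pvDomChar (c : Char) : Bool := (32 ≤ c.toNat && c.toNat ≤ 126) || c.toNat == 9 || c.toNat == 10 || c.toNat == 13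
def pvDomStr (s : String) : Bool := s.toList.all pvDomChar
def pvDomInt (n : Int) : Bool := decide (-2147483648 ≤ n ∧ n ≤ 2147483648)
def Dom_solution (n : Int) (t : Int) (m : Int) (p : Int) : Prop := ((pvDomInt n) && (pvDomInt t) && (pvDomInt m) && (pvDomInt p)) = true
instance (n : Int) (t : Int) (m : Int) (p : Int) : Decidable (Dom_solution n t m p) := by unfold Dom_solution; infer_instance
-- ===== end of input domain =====

-- B separates the two phases A interleaves: first generate the digit string long enough,
-- then gather the t sampled characters by the closed-form index p-1+m*i (objective: simpler).

-- ===== PORT A =====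

-- while k >= 1: … of change, fuel-bounded (fuel only makes the recursion total; on the
-- admitted inputs it is never exhausted)
def changeLoop (fuel : Nat) (n : Int) (k : Int) (result : List Char) : List Char :=
  match fuel with
  | 0 => result
  | fuel + 1 =>
    if 1 ≤ k then
      let r := PySem.Int.mod k n
      let digit : List Char :=
        if 10 ≤ r then [Char.ofNat (65 + (r - 10).toNat)]   -- chr(ord('A')+(remainder-10))
        else (PySem.Int.toStr r).toList                      -- str(remainder)
      changeLoop fuel n (PySem.Int.floordiv k n) (digit ++ result)
    else result

def change (n : Int) (k : Int) : List Char := changeLoop (2 ^ 64) n k []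

-- while len(answer) < t: … of A's solution, fuel-bounded; the growing strings are kept as
-- Array Char (Python's str += is amortized O(1), so is Array.push)
def solLoop (fuel : Nat) (n : Int) (t : Int) (m : Int)
    (answer : Array Char) (sequence : Array Char) (k : Int) (p : Int) : Array Char :=
  match fuel with
  | 0 => answer
  | fuel + 1 =>
    if (answer.size : Int) < t then
      let seq' := (change n k).foldl Array.push sequence   -- sequence += change(n, k)
      if p ≤ (seq'.size : Int) then
        -- sequence[p-1]: exact for 1 ≤ p (Pre_); for p ≤ 0 Python wraps or raises, excluded
        if h : 0 ≤ p - 1 ∧ (p - 1).toNat < seq'.size then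
          solLoop fuel n t m (answer.push (seq'[(p - 1).toNat]'h.2)) seq' (k + 1) (p + m)
        else answer
      else solLoop fuel n t m answer seq' (k + 1) p
    else answer

def solution (n : Int) (t : Int) (m : Int) (p : Int) : String :=
  String.ofList (solLoop (2 ^ 64) n t m #[] #['0'] 1 p).toList

-- ===== PORT B =====

-- while total < need: parts.append(change(n, k)) of B, fuel-bounded
def growLoop (fuel : Nat) (n : Int) (parts : Array (List Char)) (total : Int) (k : Int)
    (need : Int) : Array (List Char) :=
  match fuel with
  | 0 => parts
  | fuel + 1 =>
    if total < need then
      let c := change n k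
      growLoop fuel n (parts.push c) (total + (c.length : Int)) (k + 1) need
    else parts

-- s = ''.join(parts), kept as Array Char for O(1) indexing like a Python str
def joinArr (parts : Array (List Char)) : Array Char :=
  parts.foldl (fun acc c => c.foldl Array.push acc) #[]

def solution_alt (n : Int) (t : Int) (m : Int) (p : Int) : String :=
  if t ≤ 0 then "" else
    let need := p + m * (t - 1)
    let s := joinArr (growLoop (2 ^ 64) n #[['0']] 1 1 need)
    -- ''.join(s[p - 1 + m * i] for i in range(t)); the indices are in range on Pre_
    String.ofList ((PySem.List.pyRange 0 t 1).map (fun i =>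
      if h : 0 ≤ p - 1 + m * i ∧ (p - 1 + m * i).toNat < s.size
      then s[(p - 1 + m * i).toNat]'h.2 else ' '))

-- ===== PRECONDITION & SPEC =====
-- Pre_ admits every t ≤ 0 (A returns '' at once) and otherwise the game's domain n ∉ {0,1},
-- m ≥ 0, p ≥ 1: for t ≥ 1 the Python A diverges at n = 1, raises ZeroDivisionError at n = 0,
-- and for m < 0 or p < 1 it raises IndexError or returns accidental values through Python's
-- negative-index wraparound (see the cited examples).
def Pre_solution (n : Int) (t : Int) (m : Int) (p : Int) : Prop :=
  t ≤ 0 ∨ ((n ≤ -1 ∨ 2 ≤ n) ∧ 0 ≤ m ∧ 1 ≤ p)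
instance (n : Int) (t : Int) (m : Int) (p : Int) : Decidable (Pre_solution n t m p) := by
  unfold Pre_solution; infer_instance

def pvWitness_solution : Int × Int × Int × Int := (2, 4, 2, 1)

def Spec_solution (n : Int) (t : Int) (m : Int) (p : Int) (out : String) : Prop := out = solution_alt n t m p
instance (n : Int) (t : Int) (m : Int) (p : Int) (out : String) : Decidable (Spec_solution n t m p out) := by
  unfold Spec_solution; infer_instance

-- ===== CLAIM (what is proved, stated in full; the proofs are below) =====
def Claim_equal_solution : Prop := ∀ (n : Int) (t : Int) (m : Int) (p : Int), Dom_solution n t m p → Pre_solution n t m p → Spec_solution n t m p (solution n t m p)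


-- ===== LEMMAS AND PROOFS =====

-- list-level mirrors of the two loops (the invariant proofs live on List Char)
def solLoopL (fuel : Nat) (n : Int) (t : Int) (m : Int)
    (ans : List Char) (s : List Char) (k : Int) (p : Int) : List Char :=
  match fuel with
  | 0 => ans
  | fuel + 1 =>
    if (ans.length : Int) < t then
      let s' := s ++ change n k
      if p ≤ (s'.length : Int) then
        if h : 0 ≤ p - 1 ∧ (p - 1).toNat < s'.length then
          solLoopL fuel n t m (ans ++ [s'[(p - 1).toNat]'h.2]) s' (k + 1) (p + m)
        else ans
      else solLoopL fuel n t m ans s' (k + 1) p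
    else ans

def growLoopL (fuel : Nat) (n : Int) (s : List Char) (k : Int) (need : Int) : List Char :=
  match fuel with
  | 0 => s
  | fuel + 1 =>
    if (s.length : Int) < need then growLoopL fuel n (s ++ change n k) (k + 1) need else s

-- the pure generation process: the sequence after j appends, starting at counter k
def genSeq (n : Int) : List Char → Int → Nat → List Char
  | s, _, 0 => s
  | s, k, j + 1 => genSeq n (s ++ change n k) (k + 1) j

-- the characters A picks: positions p-1, p-1+m, …, read off one fixed final string S
def pickList (S : List Char) (m : Int) : Int → Nat → List Char
  | _, 0 => []
  | p, c + 1 => PySem.List.pyGetD S (p - 1) ' ' :: pickList S m (p + m) c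

theorem toList_foldl_push (l : List Char) : ∀ (a : Array Char),
    (l.foldl Array.push a).toList = a.toList ++ l := by
  induction l with
  | nil => intro a; simp
  | cons x xs ih => intro a; simp

theorem toList_solLoop (fuel : Nat) : ∀ (n t m : Int) (ans s : Array Char) (k p : Int),
    (solLoop fuel n t m ans s k p).toList = solLoopL fuel n t m ans.toList s.toList k p := by
  induction fuel with
  | zero => intro n t m ans s k p; rfl
  | succ f ih =>
    intro n t m ans s k p
    simp only [solLoop, solLoopL, ← toList_foldl_push, Array.length_toList,
      Array.getElem_toList]
    split
    · split
      · split
        · rw [ih]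
          simp
        · rfl
      · exact ih n t m ans _ (k + 1) p
    · rfl

theorem foldl_push_flatten (l : List (List Char)) : ∀ (a : Array Char),
    (l.foldl (fun acc c => c.foldl Array.push acc) a).toList = a.toList ++ l.flatten := by
  induction l with
  | nil => intro a; simp
  | cons x xs ih =>
    intro a
    rw [List.foldl_cons, ih, toList_foldl_push]
    simp

theorem joinArr_toList (parts : Array (List Char)) :
    (joinArr parts).toList = parts.toList.flatten := by
  unfold joinArr
  rw [← Array.foldl_toList]
  simpa using foldl_push_flatten parts.toList #[]

theorem growLoop_flatten (fuel : Nat) : ∀ (n : Int) (parts : Array (List Char))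
    (total k need : Int), total = (parts.toList.flatten.length : Int) →
    (growLoop fuel n parts total k need).toList.flatten
      = growLoopL fuel n parts.toList.flatten k need := by
  induction fuel with
  | zero => intro n parts total k need _; rfl
  | succ f ih =>
    intro n parts total k need htot
    simp only [growLoop, growLoopL, ← htot]
    split
    · rw [ih n (parts.push (change n k)) (total + ((change n k).length : Int)) (k + 1) need
        (by simp [htot])]
      simp
    · rfl

theorem toDigitsCore_len (b : Nat) (f : Nat) :
    ∀ (x : Nat) (ds : List Char), ds.length ≤ (Nat.toDigitsCore b f x ds).length := by
  induction f with
  | zero => intro x ds; simp [Nat.toDigitsCore]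
  | succ f ih =>
    intro x ds
    simp only [Nat.toDigitsCore]
    split
    · simp
    · exact le_trans (by simp) (ih (x / b) ((x % b).digitChar :: ds))

theorem toStr_ne_nil (r : Int) : (PySem.Int.toStr r).toList ≠ [] := by
  unfold PySem.Int.toStr PySem.Int.toChars
  rw [String.toList_ofList]
  split
  · simp
  · have h : ∀ (x : Nat), Nat.toDigits 10 x ≠ [] := by
      intro x
      unfold Nat.toDigits
      simp only [Nat.toDigitsCore]
      split
      · simp
      · intro hc
        have hl := toDigitsCore_len 10 x (x / 10) [(x % 10).digitChar]
        rw [hc] at hl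
        simp at hl
    exact h _

theorem changeLoop_acc (fuel : Nat) : ∀ (n k : Int) (res : List Char),
    ∃ pre, changeLoop fuel n k res = pre ++ res := by
  induction fuel with
  | zero => intro n k res; exact ⟨[], rfl⟩
  | succ f ih =>
    intro n k res
    simp only [changeLoop]
    split
    · obtain ⟨pre, hp⟩ := ih n (PySem.Int.floordiv k n) (_ ++ res)
      rw [hp]
      exact ⟨_, (List.append_assoc _ _ _).symm⟩
    · exact ⟨[], rfl⟩

theorem changeLoop_succ_len (f : Nat) (n k : Int) (hk : 1 ≤ k) :
    1 ≤ (changeLoop (f + 1) n k []).length := by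
  simp only [changeLoop, if_pos hk]
  obtain ⟨pre, hp⟩ := changeLoop_acc f n (PySem.Int.floordiv k n)
    ((if 10 ≤ PySem.Int.mod k n then [Char.ofNat (65 + (PySem.Int.mod k n - 10).toNat)]
      else (PySem.Int.toStr (PySem.Int.mod k n)).toList) ++ [])
  rw [hp]
  simp only [List.length_append]
  split
  · simp
  · have h1 := toStr_ne_nil (PySem.Int.mod k n)
    have h2 : 0 < (PySem.Int.toStr (PySem.Int.mod k n)).toList.length :=
      List.length_pos_iff.mpr h1
    omega

theorem change_length_pos (n k : Int) (hk : 1 ≤ k) : 1 ≤ (change n k).length := by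
  unfold change
  rw [show (2 : Nat) ^ 64 = (2 ^ 64 - 1) + 1 from by norm_num]
  exact changeLoop_succ_len (2 ^ 64 - 1) n k hk

theorem genSeq_prefix (n : Int) (j : Nat) : ∀ (s : List Char) (k : Int), s <+: genSeq n s k j := by
  induction j with
  | zero => intro s k; exact List.prefix_rfl
  | succ j ih =>
    intro s k
    exact (List.prefix_append s (change n k)).trans (ih (s ++ change n k) (k + 1))

theorem growLoopL_eq_genSeq (fuel : Nat) : ∀ (n : Int) (s : List Char) (k : Int) (need : Int),
    ∃ j, growLoopL fuel n s k need = genSeq n s k j := by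
  induction fuel with
  | zero => intro n s k need; exact ⟨0, rfl⟩
  | succ f ih =>
    intro n s k need
    simp only [growLoopL]
    split
    · obtain ⟨j, hj⟩ := ih n (s ++ change n k) (k + 1) need
      exact ⟨j + 1, hj⟩
    · exact ⟨0, rfl⟩

theorem growLoopL_long (fuel : Nat) :
    ∀ (n : Int) (s : List Char) (k : Int) (need : Int), 1 ≤ k →
    (need - (s.length : Int)).toNat ≤ fuel →
    need ≤ ((growLoopL fuel n s k need).length : Int) := by
  induction fuel with
  | zero =>
    intro n s k need _ hf
    simp only [growLoopL]
    omega
  | succ f ih =>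
    intro n s k need hk hf
    simp only [growLoopL]
    split
    · rename_i hlt
      apply ih n (s ++ change n k) (k + 1) need (by omega)
      have := change_length_pos n k hk
      simp only [List.length_append]
      omega
    · omega

theorem solLoopL_nil (fuel : Nat) (n t m : Int) (s : List Char) (k p : Int) (ht : t ≤ 0) :
    solLoopL fuel n t m [] s k p = [] := by
  cases fuel with
  | zero => rfl
  | succ f =>
    simp only [solLoopL]
    rw [if_neg (by simp only [List.length_nil, Nat.cast_zero]; omega)]

theorem solLoopL_eq_pickList (fuel : Nat) :
    ∀ (n t m : Int) (S ans s : List Char) (k p : Int),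
    0 ≤ m → 1 ≤ p → 1 ≤ k →
    ((∃ j, genSeq n s k j = S) ∨ S <+: s) →
    p + m * (t - (ans.length : Int) - 1) ≤ (S.length : Int) →
    (t - (ans.length : Int)).toNat * (m.toNat + 1) + (p - (s.length : Int)).toNat ≤ fuel →
    solLoopL fuel n t m ans s k p = ans ++ pickList S m p (t - (ans.length : Int)).toNat := by
  induction fuel with
  | zero =>
    intro n t m S ans s k p hm hp hk _ _ hf
    have h0 : (t - (ans.length : Int)).toNat * (m.toNat + 1) = 0 := by omega
    have h1 : (t - (ans.length : Int)).toNat = 0 := by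
      rcases Nat.mul_eq_zero.mp h0 with h | h
      · exact h
      · omega
    rw [h1]
    simp [solLoopL, pickList]
  | succ f ih =>
    intro n t m S ans s k p hm hp hk hcomp hbound hf
    simp only [solLoopL]
    by_cases hg : (ans.length : Int) < t
    · rw [if_pos hg]
      have hlen' : (s.length : Int) + 1 ≤ ((s ++ change n k).length : Int) := by
        have := change_length_pos n k hk
        simp only [List.length_append]
        omega
      have hcomp' : (∃ j, genSeq n (s ++ change n k) (k + 1) j = S) ∨ S <+: (s ++ change n k) := by
        rcases hcomp with ⟨j, hj⟩ | hpre
        · cases j with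
          | zero =>
            right
            have hS : S = s := hj.symm
            rw [hS]
            exact List.prefix_append s (change n k)
          | succ j' => exact Or.inl ⟨j', hj⟩
        · exact Or.inr (hpre.trans (List.prefix_append s (change n k)))
      by_cases hple : p ≤ ((s ++ change n k).length : Int)
      · rw [if_pos hple]
        have hidx0 : (0 : Int) ≤ p - 1 := by omega
        have hidxlt : p - 1 < ((s ++ change n k).length : Int) := by omega
        have hg1 : (p - 1).toNat < (s ++ change n k).length := by omega
        have hmnn : (0 : Int) ≤ m * (t - (ans.length : Int) - 1) :=
          mul_nonneg hm (by omega)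
        have hidxS : (p - 1).toNat < S.length := by omega
        have hchar : (s ++ change n k)[(p - 1).toNat]'hg1 = PySem.List.pyGetD S (p - 1) ' ' := by
          rw [PySem.List.pyGetD_eq_getElem S ' ' hidx0 (by omega)]
          rcases hcomp' with ⟨j, hj⟩ | hpre
          · have hsp : (s ++ change n k) <+: S := by
              rw [← hj]; exact genSeq_prefix n j (s ++ change n k) (k + 1)
            exact List.IsPrefix.getElem hsp hg1
          · exact (List.IsPrefix.getElem hpre hidxS).symm
        rw [dif_pos ⟨hidx0, hg1⟩, hchar]
        have hcnt : (t - ((ans ++ [PySem.List.pyGetD S (p - 1) ' ']).length : Int)).toNat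
            = (t - (ans.length : Int)).toNat - 1 := by
          simp only [List.length_append, List.length_cons, List.length_nil]
          omega
        have hbound' : p + m + m * (t - ((ans ++ [PySem.List.pyGetD S (p - 1) ' ']).length : Int) - 1)
            ≤ (S.length : Int) := by
          have hdist : m * (t - (ans.length : Int) - 1)
              = m + m * (t - (ans.length : Int) - 2) := by ring
          simp only [List.length_append, List.length_cons, List.length_nil]
          push_cast
          have heq2 : m * (t - ((ans.length : Int) + 1) - 1) = m * (t - (ans.length : Int) - 2) := by
            ring
          omega
        have hX1 : 1 ≤ (t - (ans.length : Int)).toNat := by omega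
        have hprod : (t - (ans.length : Int)).toNat * (m.toNat + 1)
            = ((t - (ans.length : Int)).toNat - 1) * (m.toNat + 1) + (m.toNat + 1) := by
          obtain ⟨d, hd⟩ : ∃ d, (t - (ans.length : Int)).toNat = d + 1 :=
            ⟨(t - (ans.length : Int)).toNat - 1, by omega⟩
          rw [hd]
          simp only [Nat.add_sub_cancel]
          ring
        have hf' : (t - ((ans ++ [PySem.List.pyGetD S (p - 1) ' ']).length : Int)).toNat
              * (m.toNat + 1) + (p + m - ((s ++ change n k).length : Int)).toNat ≤ f := by
          rw [hcnt]
          omega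
        rw [ih n t m S (ans ++ [PySem.List.pyGetD S (p - 1) ' ']) (s ++ change n k)
          (k + 1) (p + m) hm (by omega) (by omega) hcomp' hbound' hf']
        have hpk : pickList S m p (t - (ans.length : Int)).toNat
            = PySem.List.pyGetD S (p - 1) ' '
              :: pickList S m (p + m) ((t - (ans.length : Int)).toNat - 1) := by
          obtain ⟨c', hc'⟩ : ∃ c', (t - (ans.length : Int)).toNat = c' + 1 :=
            ⟨(t - (ans.length : Int)).toNat - 1, by omega⟩
          rw [hc']
          simp [pickList]
        rw [hpk, hcnt]
        simp
      · rw [if_neg hple]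
        apply ih n t m S ans (s ++ change n k) (k + 1) p hm hp (by omega) hcomp' hbound
        have hd : (p - ((s ++ change n k).length : Int)).toNat
            < (p - (s.length : Int)).toNat := by omega
        omega
    · rw [if_neg hg]
      have h1 : (t - (ans.length : Int)).toNat = 0 := by omega
      rw [h1]
      simp [pickList]

theorem pickList_eq_map (S : List Char) (m : Int) :
    ∀ (c : Nat) (p : Int),
    pickList S m p c
      = (List.range c).map (fun i : Nat => PySem.List.pyGetD S (p - 1 + m * (i : Int)) ' ') := by
  intro c
  induction c with
  | zero => intro p; simp [pickList]
  | succ c ih =>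
    intro p
    rw [List.range_succ_eq_map]
    simp only [pickList, List.map_cons, List.map_map, Nat.cast_zero]
    rw [ih (p + m)]
    congr 1
    · congr 1
      ring
    · apply List.map_congr_left
      intro i _
      simp only [Function.comp_apply]
      congr 1
      push_cast
      ring

-- ===== VERDICT (by name: the statement is the Claim_ definition above) =====
theorem solution_spec : Claim_equal_solution := by
  unfold Claim_equal_solution Spec_solution
  intro n t m p hdom hpre
  unfold Dom_solution pvDomInt at hdom
  simp only [Bool.and_eq_true, decide_eq_true_eq] at hdom
  obtain ⟨⟨⟨hdn, hdt⟩, hdm⟩, hdp⟩ := hdom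
  unfold solution solution_alt
  rw [toList_solLoop]
  by_cases ht : t ≤ 0
  · rw [if_pos ht]
    rw [show (#[] : Array Char).toList = [] from rfl]
    rw [solLoopL_nil (2 ^ 64) n t m (#['0'] : Array Char).toList 1 p ht]
  · rw [if_neg ht]
    rcases hpre with h | ⟨_, hm, hp⟩
    · exact absurd h ht
    dsimp only
    have hfuelS : (p + m * (t - 1) - (((['0'] : List Char).length : Int))).toNat ≤ 2 ^ 64 := by
      have hmul : m * (t - 1) ≤ 2147483648 * 2147483648 :=
        mul_le_mul hdm.2 (by omega) (by omega) (by omega)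
      simp only [List.length_cons, List.length_nil]
      omega
    have hSd : (joinArr (growLoop (2 ^ 64) n #[['0']] 1 1 (p + m * (t - 1)))).toList
        = growLoopL (2 ^ 64) n ['0'] 1 (p + m * (t - 1)) := by
      rw [joinArr_toList,
        growLoop_flatten (2 ^ 64) n #[['0']] 1 1 (p + m * (t - 1)) (by simp)]
      simp
    have hS : p + m * (t - 1)
        ≤ (((joinArr (growLoop (2 ^ 64) n #[['0']] 1 1 (p + m * (t - 1)))).toList.length : Int)) := by
      rw [hSd]
      exact growLoopL_long (2 ^ 64) n ['0'] 1 (p + m * (t - 1)) le_rfl hfuelS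
    obtain ⟨j, hj⟩ := growLoopL_eq_genSeq (2 ^ 64) n ['0'] 1 (p + m * (t - 1))
    have hmain := solLoopL_eq_pickList (2 ^ 64) n t m
      ((joinArr (growLoop (2 ^ 64) n #[['0']] 1 1 (p + m * (t - 1)))).toList) [] ['0'] 1 p hm hp le_rfl
      (Or.inl ⟨j, by rw [hSd]; exact hj.symm⟩)
      (by simp only [List.length_nil, Nat.cast_zero, sub_zero]; exact hS)
      (by
        simp only [List.length_nil, List.length_cons, Nat.cast_zero, sub_zero]
        have h1 : t.toNat ≤ 2147483648 := by omega
        have h2 : m.toNat + 1 ≤ 2147483649 := by omega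
        have h3 := Nat.mul_le_mul h1 h2
        omega)
    rw [hmain]
    simp only [List.nil_append, List.length_nil, Nat.cast_zero, sub_zero]
    congr 1
    rw [pickList_eq_map]
    have hdite : ∀ i ∈ PySem.List.pyRange 0 t 1,
        (if h : 0 ≤ p - 1 + m * i ∧
              (p - 1 + m * i).toNat < (joinArr (growLoop (2 ^ 64) n #[['0']] 1 1 (p + m * (t - 1)))).size
          then (joinArr (growLoop (2 ^ 64) n #[['0']] 1 1 (p + m * (t - 1))))[(p - 1 + m * i).toNat]'h.2
          else ' ')
        = PySem.List.pyGetD ((joinArr (growLoop (2 ^ 64) n #[['0']] 1 1 (p + m * (t - 1)))).toList)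
            (p - 1 + m * i) ' ' := by
      intro i hi
      rw [PySem.List.mem_pyRange_one] at hi
      have him : m * i ≤ m * (t - 1) := by
        apply mul_le_mul_of_nonneg_left (by omega) hm
      have hnn : (0 : Int) ≤ m * i := mul_nonneg hm (by omega)
      have hlt : p - 1 + m * i
          < ((joinArr (growLoop (2 ^ 64) n #[['0']] 1 1 (p + m * (t - 1)))).toList.length : Int) := by
        omega
      rw [dif_pos ⟨by omega, by rw [← Array.length_toList]; omega⟩]
      rw [PySem.List.pyGetD_eq_getElem _ ' ' (by omega) hlt]
      exact (Array.getElem_toList _).symm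
    rw [List.map_congr_left hdite]
    rw [PySem.List.pyRange_one]
    simp only [List.map_map, sub_zero]
    apply List.map_congr_left
    intro i _
    simp only [Function.comp_apply]
    congr 1
    ring
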